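-- pv_equiv track=rewrite | github.com/marcosfrancesquini/planilhas | orquestrador_lp.py | analise_por_bloco
-- ===== SOURCE A (Python) =====
-- from typing import List, Tuple, Dict, Optional, Any
--
-- def analise_por_bloco(linhas: List[List[int]], K: int):
--     N = len(linhas)
--     C = N // K
--     r = N - C*K
--     dados: Dict[int, tuple[int, int, int]] = {}
--     if C == 0:
--         for n in range(100):
--             freq_incomp = 0
--             for i in range(0, r):
--                 freq_incomp += sum(1 for x in linhas[i] if x == n)
--             dados[n] = (0, 0, freq_incomp)
--         return C, r, dados
--
--     blocos_freq: List[List[int]] = []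
--     for j in range(C):
--         i0 = j*K
--         i1 = (j+1)*K
--         hist = [0]*100
--         for i in range(i0, i1):
--             for x in linhas[i]:
--                 if 0 <= x <= 99:
--                     hist[x] += 1
--         blocos_freq.append(hist)
--
--     hist_incomp = [0]*100
--     if r > 0:
--         i0 = C*K
--         i1 = N
--         for i in range(i0, i1):
--             for x in linhas[i]:
--                 if 0 <= x <= 99:
--                     hist_incomp[x] += 1
--
--     for n in range(100):
--         col = [blocos_freq[j][n] for j in range(C)]
--         max_c = max(col) if col else 0
--         min_c = min(col) if col else 0
--         dados[n] = (max_c, min_c, hist_incomp[n] if r > 0 else 0)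
--
--     return C, r, dados
-- ===== SOURCE B (Python) =====
-- def analise_por_bloco(linhas, K):
--     N = len(linhas)
--     C = N // K
--     r = N - C * K
--
--     def _hist(rows):
--         h = [0] * 100
--         for row in rows:
--             for x in row:
--                 if 0 <= x <= 99:
--                     h[x] += 1
--         return h
--
--     if C == 0:
--         inc = _hist(linhas[:r])
--         return C, r, {n: (0, 0, inc[n]) for n in range(100)}
--
--     st = None
--     for j in range(C):
--         h = _hist(linhas[j * K:(j + 1) * K])
--         if st is None:
--             st = (h, h)
--         else:
--             ma, mi = st
--             st = ([max(a, b) for a, b in zip(ma, h)],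
--                   [min(a, b) for a, b in zip(mi, h)])
--     rmax, rmin = st if st is not None else ([0] * 100, [0] * 100)
--     inc = _hist(linhas[C * K:N]) if r > 0 else [0] * 100
--     return C, r, {n: (rmax[n], rmin[n], inc[n]) for n in range(100)}
-- ===== Notes on version B (the rewrite author's own statement) =====
-- stated objective: faster
-- what changed: B drops A's stored list of all C block histograms and its 100-column transpose pass (max/min per digit column), folding the min/max reduction into the block loop as a running elementwise (max, min) pair, and replaces A's 100 separate counting passes over the rows in the C==0 branch by a single histogram pass over linhas[:r].
import Mathlib
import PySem

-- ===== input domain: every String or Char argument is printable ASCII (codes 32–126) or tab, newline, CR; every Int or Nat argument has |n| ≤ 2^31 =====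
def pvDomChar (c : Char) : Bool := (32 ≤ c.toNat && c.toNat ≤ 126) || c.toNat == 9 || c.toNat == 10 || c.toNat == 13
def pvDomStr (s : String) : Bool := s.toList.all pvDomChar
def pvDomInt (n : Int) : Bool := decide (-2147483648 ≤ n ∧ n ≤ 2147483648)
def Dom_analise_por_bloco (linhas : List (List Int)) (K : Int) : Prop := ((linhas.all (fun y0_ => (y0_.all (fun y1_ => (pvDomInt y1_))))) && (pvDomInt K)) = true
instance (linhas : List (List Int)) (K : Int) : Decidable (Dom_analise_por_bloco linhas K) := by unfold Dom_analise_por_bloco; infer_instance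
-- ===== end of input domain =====

-- B replaces A's "store all C block histograms, then transpose with a per-digit column scan"
-- by a single running elementwise max/min pair updated per block (and a one-pass histogram for
-- the C==0 branch); equivalence of the RETURN value is proved for every K ≠ 0.

-- ===== PORT A =====
-- `if 0 <= x <= 99: hist[x] += 1`  (the inner statement of every histogram loop in both Pythons)
def pvInc (hist : List Int) (x : Int) : List Int :=
  if 0 ≤ x ∧ x ≤ 99 then PySem.List.pySetD hist x (PySem.List.pyGetD hist x 0 + 1) else hist

-- A's index-driven histogram loop: `hist=[0]*100; for i in range(i0,i1): for x in linhas[i]: …`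
-- (linhas[i] is always in range when this is reached; the [] default is never used)
def pvHistIdx (linhas : List (List Int)) (i0 i1 : Int) : List Int :=
  (PySem.List.pyRange i0 i1).foldl
    (fun h i => (PySem.List.pyGetD linhas i []).foldl pvInc h) (List.replicate 100 0)

-- the dict `dados` has the fresh keys 0..99 inserted in order, so it is the association list
-- built by appending (n, value) for n = 0..99
def analise_por_bloco (linhas : List (List Int)) (K : Int) : Int × Int × (List (Int × Int × Int × Int)) :=
  let N : Int := PySem.List.len linhas
  let C : Int := PySem.Int.floordiv N K
  let r : Int := N - C * K
  if C = 0 then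
    let dados := (PySem.List.pyRange 0 100).foldl (fun d n =>
      let freq := (PySem.List.pyRange 0 r).foldl (fun acc i =>
        acc + ((PySem.List.pyGetD linhas i []).map (fun x => if x = n then (1 : Int) else 0)).sum) 0
      d ++ [(n, 0, 0, freq)]) []
    (C, r, dados)
  else
    let blocos := (PySem.List.pyRange 0 C).foldl (fun bs j =>
      bs ++ [pvHistIdx linhas (j * K) ((j + 1) * K)]) []
    let hist_incomp := if r > 0 then pvHistIdx linhas (C * K) N else List.replicate 100 0
    let dados := (PySem.List.pyRange 0 100).foldl (fun d n =>
      let col := (PySem.List.pyRange 0 C).map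
        (fun j => PySem.List.pyGetD (PySem.List.pyGetD blocos j []) n 0)
      let max_c := if col = [] then 0 else (PySem.List.max? col (fun y => y)).getD 0
      let min_c := if col = [] then 0 else (PySem.List.min? col (fun y => y)).getD 0
      d ++ [(n, max_c, min_c, if r > 0 then PySem.List.pyGetD hist_incomp n 0 else 0)]) []
    (C, r, dados)

-- ===== PORT B =====
-- B's `_hist(rows)`: one histogram pass over a list of rows
def pvHist (rows : List (List Int)) : List Int :=
  rows.foldl (fun h row => row.foldl pvInc h) (List.replicate 100 0)

-- B's loop body: update the running (max, min) pair with the current block's histogram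
def pvStep (linhas : List (List Int)) (K : Int)
    (st : Option (List Int × List Int)) (j : Int) : Option (List Int × List Int) :=
  let h := pvHist (PySem.List.slice linhas (some (j * K)) (some ((j + 1) * K)))
  match st with
  | none => some (h, h)
  | some (ma, mi) => some (ma.zipWith max h, mi.zipWith min h)

def analise_por_bloco_alt (linhas : List (List Int)) (K : Int) : Int × Int × (List (Int × Int × Int × Int)) :=
  let N : Int := PySem.List.len linhas
  let C : Int := PySem.Int.floordiv N K
  let r : Int := N - C * K
  if C = 0 then
    let inc := pvHist (PySem.List.slice linhas none (some r))
    (C, r, (PySem.List.pyRange 0 100).foldl (fun d n =>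
      d ++ [(n, 0, 0, PySem.List.pyGetD inc n 0)]) [])
  else
    let st := (PySem.List.pyRange 0 C).foldl (pvStep linhas K) none
    let p := st.getD (List.replicate 100 0, List.replicate 100 0)
    let inc := if r > 0 then pvHist (PySem.List.slice linhas (some (C * K)) (some N))
               else List.replicate 100 0
    (C, r, (PySem.List.pyRange 0 100).foldl (fun d n =>
      d ++ [(n, PySem.List.pyGetD p.1 n 0, PySem.List.pyGetD p.2 n 0,
             PySem.List.pyGetD inc n 0)]) [])

-- ===== PRECONDITION & SPEC =====
-- Pre_ excludes only K = 0, on which Python's `N // K` raises ZeroDivisionError (in A and in B alike).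
def Pre_analise_por_bloco (_linhas : List (List Int)) (K : Int) : Prop := K ≠ 0
instance (linhas : List (List Int)) (K : Int) : Decidable (Pre_analise_por_bloco linhas K) := by unfold Pre_analise_por_bloco; infer_instance
def pvWitness_analise_por_bloco : List (List Int) × Int := ([[0, 3], [3, 250]], 1)

def Spec_analise_por_bloco (linhas : List (List Int)) (K : Int) (out : Int × Int × (List (Int × Int × Int × Int))) : Prop := out = analise_por_bloco_alt linhas K
instance (linhas : List (List Int)) (K : Int) (out : Int × Int × (List (Int × Int × Int × Int))) : Decidable (Spec_analise_por_bloco linhas K out) := by unfold Spec_analise_por_bloco; infer_instance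

-- ===== CLAIM (what is proved, stated in full; the proofs are below) =====
def Claim_equal_analise_por_bloco : Prop := ∀ (linhas : List (List Int)) (K : Int), Dom_analise_por_bloco linhas K → Pre_analise_por_bloco linhas K → Spec_analise_por_bloco linhas K (analise_por_bloco linhas K)

-- ===== LEMMAS AND PROOFS =====

lemma pvInc_length (h : List Int) (x : Int) : (pvInc h x).length = h.length := by
  unfold pvInc
  split
  · exact PySem.List.length_pySetD h x _
  · rfl

lemma pvInc_getD (h : List Int) (x : Int) (n : Nat) (hn : n < 100) (hl : h.length = 100) :
    PySem.List.pyGetD (pvInc h x) (n : Int) 0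
      = PySem.List.pyGetD h (n : Int) 0 + (if x = (n : Int) then 1 else 0) := by
  unfold pvInc
  by_cases hx : 0 ≤ x ∧ x ≤ 99
  · obtain ⟨hx0, hx99⟩ := hx
    rw [if_pos ⟨hx0, hx99⟩]
    have hxe : ((x.toNat : Nat) : Int) = x := Int.toNat_of_nonneg hx0
    rw [← hxe, PySem.List.pyGetD_pySetD_natCast h x.toNat n _ _ (by omega)]
    by_cases hnx : n = x.toNat
    · subst hnx; simp
    · have hne : ¬ (((x.toNat : Nat) : Int) = ((n : Nat) : Int)) := by
        intro hh
        exact hnx (by exact_mod_cast hh.symm)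
      rw [if_neg hnx, if_neg hne, add_zero]
  · rw [if_neg hx]
    have hne : ¬ (x = ((n : Nat) : Int)) := by
      push Not at hx
      omega
    rw [if_neg hne, add_zero]

lemma foldlInc_length (row : List Int) (h : List Int) :
    (row.foldl pvInc h).length = h.length := by
  induction row generalizing h with
  | nil => rfl
  | cons x xs ih => rw [List.foldl_cons, ih, pvInc_length]

lemma foldlInc_getD (row : List Int) (h : List Int) (n : Nat) (hn : n < 100) (hl : h.length = 100) :
    PySem.List.pyGetD (row.foldl pvInc h) (n : Int) 0
      = PySem.List.pyGetD h (n : Int) 0 + (row.countP (fun x => x = (n : Int)) : Int) := by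
  induction row generalizing h with
  | nil => simp
  | cons x xs ih =>
      rw [List.foldl_cons, ih (pvInc h x) (by rw [pvInc_length, hl]),
        pvInc_getD h x n hn hl, List.countP_cons]
      by_cases hx : x = (n : Int)
      · simp [hx]
        ring
      · simp [hx]

lemma pvHistFold_length (rows : List (List Int)) (h : List Int) :
    (rows.foldl (fun h row => row.foldl pvInc h) h).length = h.length := by
  induction rows generalizing h with
  | nil => rfl
  | cons row rows ih => rw [List.foldl_cons, ih, foldlInc_length]

lemma pvHist_length (rows : List (List Int)) : (pvHist rows).length = 100 := by
  unfold pvHist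
  rw [pvHistFold_length]
  simp

lemma pvHistFold_getD (rows : List (List Int)) (h : List Int) (n : Nat)
    (hn : n < 100) (hl : h.length = 100) :
    PySem.List.pyGetD (rows.foldl (fun h row => row.foldl pvInc h) h) (n : Int) 0
      = PySem.List.pyGetD h (n : Int) 0 + (rows.flatten.countP (fun x => x = (n : Int)) : Int) := by
  induction rows generalizing h with
  | nil => simp
  | cons row rows ih =>
      rw [List.foldl_cons, ih _ (by rw [foldlInc_length, hl]),
        foldlInc_getD row h n hn hl]
      simp [List.countP_append]
      ring

lemma pyGetD_replicate_zero (n : Nat) (hn : n < 100) :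
    PySem.List.pyGetD (List.replicate 100 (0 : Int)) (n : Int) 0 = 0 := by
  rw [PySem.List.pyGetD_natCast, List.getD_eq_getElem _ _ (by simpa using hn),
    List.getElem_replicate]

lemma pvHist_getD (rows : List (List Int)) (n : Nat) (hn : n < 100) :
    PySem.List.pyGetD (pvHist rows) (n : Int) 0
      = (rows.flatten.countP (fun x => x = (n : Int)) : Int) := by
  unfold pvHist
  rw [pvHistFold_getD _ _ _ hn (by simp), pyGetD_replicate_zero n hn]
  simp

-- A's index loop over i = a..b-1 reads exactly the rows of linhas[a:b]
lemma foldl_range_rows_nat {β : Type} (linhas : List (List Int)) (f : β → List Int → β)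
    (b : Nat) (hb : b ≤ linhas.length) :
    ∀ (m a : Nat) (init : β), b - a ≤ m →
      (PySem.List.pyRange (a : Int) (b : Int)).foldl
          (fun acc i => f acc (PySem.List.pyGetD linhas i [])) init
        = ((linhas.drop a).take (b - a)).foldl f init := by
  intro m
  induction m with
  | zero =>
      intro a init hm
      have hba : b ≤ a := by omega
      rw [PySem.List.pyRange_one_eq_nil (by exact_mod_cast hba)]
      simp [Nat.sub_eq_zero_of_le hba]
  | succ m ih =>
      intro a init hm
      by_cases hab : a < b
      · rw [PySem.List.pyRange_one_cons (by exact_mod_cast hab)]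
        rw [List.foldl_cons]
        have ha : a < linhas.length := lt_of_lt_of_le hab hb
        have hgd : PySem.List.pyGetD linhas ((a : Nat) : Int) [] = linhas[a] := by
          rw [PySem.List.pyGetD_natCast, List.getD_eq_getElem _ _ ha]
        have hcast : ((a : Nat) : Int) + 1 = ((a + 1 : Nat) : Int) := by push_cast; ring
        rw [hgd, hcast, ih (a + 1) (f init linhas[a]) (by omega)]
        rw [List.drop_eq_getElem_cons ha]
        have hsub : b - a = (b - (a + 1)) + 1 := by omega
        rw [hsub, List.take_succ_cons, List.foldl_cons]
      · have hba : b ≤ a := by omega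
        rw [PySem.List.pyRange_one_eq_nil (by exact_mod_cast hba)]
        simp [Nat.sub_eq_zero_of_le hba]

lemma foldl_range_rows {β : Type} (linhas : List (List Int)) (f : β → List Int → β) (init : β)
    (i0 i1 : Int) (h0 : 0 ≤ i0) (h01 : i0 ≤ i1) (h1 : i1 ≤ (linhas.length : Int)) :
    (PySem.List.pyRange i0 i1).foldl (fun acc i => f acc (PySem.List.pyGetD linhas i [])) init
      = (PySem.List.slice linhas (some i0) (some i1)).foldl f init := by
  obtain ⟨a, rfl⟩ : ∃ a : Nat, i0 = (a : Int) := ⟨i0.toNat, (Int.toNat_of_nonneg h0).symm⟩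
  obtain ⟨b, rfl⟩ : ∃ b : Nat, i1 = (b : Int) := ⟨i1.toNat, (Int.toNat_of_nonneg (le_trans h0 h01)).symm⟩
  rw [PySem.List.slice_natCast]
  exact foldl_range_rows_nat linhas f b (by exact_mod_cast h1) (b - a) a init (le_refl _)

lemma pvHistIdx_eq (linhas : List (List Int)) (i0 i1 : Int)
    (h0 : 0 ≤ i0) (h01 : i0 ≤ i1) (h1 : i1 ≤ (linhas.length : Int)) :
    pvHistIdx linhas i0 i1 = pvHist (PySem.List.slice linhas (some i0) (some i1)) := by
  unfold pvHistIdx pvHist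
  exact foldl_range_rows linhas _ _ i0 i1 h0 h01 h1

lemma pvStep_foldl (linhas : List (List Int)) (K : Int) (js : List Int) (ma mi : List Int) :
    js.foldl (pvStep linhas K) (some (ma, mi))
      = some (js.foldl (fun a j => a.zipWith max
               (pvHist (PySem.List.slice linhas (some (j * K)) (some ((j + 1) * K))))) ma,
             js.foldl (fun a j => a.zipWith min
               (pvHist (PySem.List.slice linhas (some (j * K)) (some ((j + 1) * K))))) mi) := by
  induction js generalizing ma mi with
  | nil => rfl
  | cons j js ih => simp only [List.foldl_cons, pvStep, ih]

lemma zip_getD (op : Int → Int → Int) (a b : List Int) (n : Nat)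
    (hn : n < 100) (ha : a.length = 100) (hb : b.length = 100) :
    PySem.List.pyGetD (a.zipWith op b) (n : Int) 0
      = op (PySem.List.pyGetD a (n : Int) 0) (PySem.List.pyGetD b (n : Int) 0) := by
  rw [PySem.List.pyGetD_natCast, PySem.List.pyGetD_natCast, PySem.List.pyGetD_natCast,
    List.getD_eq_getElem _ _ (by rw [List.length_zipWith, ha, hb]; omega),
    List.getD_eq_getElem _ _ (by omega), List.getD_eq_getElem _ _ (by omega),
    List.getElem_zipWith]

lemma foldl_zip_getD (op : Int → Int → Int) (js : List Int) (g : Int → List Int) (a : List Int)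
    (n : Nat) (hn : n < 100) (ha : a.length = 100) (hg : ∀ j, (g j).length = 100) :
    PySem.List.pyGetD (js.foldl (fun acc j => acc.zipWith op (g j)) a) (n : Int) 0
      = js.foldl (fun acc j => op acc (PySem.List.pyGetD (g j) (n : Int) 0))
          (PySem.List.pyGetD a (n : Int) 0) := by
  induction js generalizing a with
  | nil => simp
  | cons j js ih =>
      have hz : (a.zipWith op (g j)).length = 100 := by
        rw [List.length_zipWith, ha, hg]; simp
      rw [List.foldl_cons, List.foldl_cons, ih _ hz, zip_getD op a (g j) n hn ha (hg j)]

lemma natCast_list_sum (l : List Nat) :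
    ((l.sum : Nat) : Int) = (l.map (fun x : Nat => (x : Int))).sum := by
  induction l with
  | nil => simp
  | cons x xs ih => simp [List.sum_cons, ih]

-- ===== VERDICT (by name: the statement is the Claim_ definition above) =====
set_option maxRecDepth 8000 in
set_option maxHeartbeats 2000000 in
theorem analise_por_bloco_spec : Claim_equal_analise_por_bloco := by
  intro linhas K _dom hK
  unfold Pre_analise_por_bloco at hK
  unfold Spec_analise_por_bloco
  unfold analise_por_bloco analise_por_bloco_alt
  simp only [PySem.List.len_eq]
  set N : Int := ((linhas.length : Nat) : Int) with hN
  set C : Int := PySem.Int.floordiv N K with hCdef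
  set r : Int := N - C * K with hrdef
  have hN0 : 0 ≤ N := by rw [hN]; exact_mod_cast Nat.zero_le _
  have hmod := PySem.Int.floordiv_mul_add_mod N K
  rw [← hCdef] at hmod
  have hr_mod : r = PySem.Int.mod N K := by rw [hrdef]; linarith
  have hrow : ∀ (m : Nat) (row : List Int),
      (row.map (fun x => if x = (m : Int) then (1 : Int) else 0)).sum
        = ((row.countP (fun x => x = (m : Int)) : Nat) : Int) := by
    intro m row
    rw [← PySem.List.sum_map_ite_one_zero (fun x => decide (x = (m : Int))) row]
    simp
  by_cases hC0 : C = 0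
  · -- the C == 0 branch of both programs: r = N and both count every row
    rw [if_pos hC0, if_pos hC0]
    have hrN : r = N := by rw [hrdef, hC0]; ring
    refine congrArg (Prod.mk C) (congrArg (Prod.mk r) ?_)
    apply PySem.List.foldl_congr_mem
    intro acc n hn
    rw [PySem.List.mem_pyRange_one] at hn
    obtain ⟨m, rfl⟩ : ∃ m : Nat, n = (m : Int) := ⟨n.toNat, (Int.toNat_of_nonneg hn.1).symm⟩
    have hm : m < 100 := by exact_mod_cast hn.2
    rw [hrN, hN,
      PySem.List.foldl_pyRange_zero_pyGetD' linhas []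
        (fun acc row => acc + (row.map (fun x => if x = (m : Int) then (1 : Int) else 0)).sum) 0,
      PySem.List.foldl_add,
      PySem.List.slice_to_natCast, List.take_length,
      pvHist_getD linhas m hm]
    simp only [zero_add, hrow m]
    rw [List.countP_flatten, natCast_list_sum, List.map_map]
    rfl
  · rw [if_neg hC0, if_neg hC0]
    refine congrArg (Prod.mk C) (congrArg (Prod.mk r) ?_)
    rcases lt_trichotomy C 0 with hCneg | hCz | hCpos
    · -- C < 0 happens only for K < 0: every range(C) loop is empty and r ≤ 0
      have hKneg : K < 0 := by
        rcases lt_trichotomy K 0 with h | h | h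
        · exact h
        · exact absurd h hK
        · exfalso
          have hge : 0 ≤ C := by
            rw [hCdef, PySem.Int.floordiv_eq_ediv_of_pos h]
            exact Int.ediv_nonneg hN0 h.le
          omega
      have hnr : ¬ r > 0 := by
        have := (PySem.Int.mod_neg_bounds N hKneg).2
        omega
      simp only [PySem.List.pyRange_one_eq_nil hCneg.le, List.foldl_nil, List.map_nil]
      apply PySem.List.foldl_congr_mem
      intro acc n hn
      rw [PySem.List.mem_pyRange_one] at hn
      obtain ⟨m, rfl⟩ : ∃ m : Nat, n = (m : Int) := ⟨n.toNat, (Int.toNat_of_nonneg hn.1).symm⟩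
      have hm : m < 100 := by exact_mod_cast hn.2
      simp only [Option.getD_none, pyGetD_replicate_zero m hm, if_neg hnr, reduceIte]
    · exact absurd hCz hC0
    · -- C ≥ 1 (so K ≥ 1): one complete block per j < C
      have hKpos : 0 < K := by
        rcases lt_trichotomy K 0 with h | h | h
        · exfalso
          have h1 : C * K ≤ 1 * K := mul_le_mul_of_nonpos_right (by omega) h.le
          have h2 := (PySem.Int.mod_neg_bounds N h).2
          rw [← hr_mod] at h2
          have := hrdef
          nlinarith
        · exact absurd h hK
        · exact h
      have hr0 : 0 ≤ r := by rw [hr_mod]; exact PySem.Int.mod_nonneg N hKpos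
      have hCKN : C * K ≤ N := by
        have := hr0
        rw [hrdef] at this
        linarith
      simp only [PySem.List.foldl_append_singleton_eq_map, List.nil_append]
      apply List.map_congr_left
      intro n hn
      rw [PySem.List.mem_pyRange_one] at hn
      obtain ⟨m, rfl⟩ : ∃ m : Nat, n = (m : Int) := ⟨n.toNat, (Int.toNat_of_nonneg hn.1).symm⟩
      have hm : m < 100 := by exact_mod_cast hn.2
      have hcol : (PySem.List.pyRange 0 C).map (fun j =>
            PySem.List.pyGetD (PySem.List.pyGetD
              ((PySem.List.pyRange 0 C).map (fun j => pvHistIdx linhas (j * K) ((j + 1) * K))) j [])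
              ((m : Nat) : Int) 0)
          = (PySem.List.pyRange 0 C).map (fun j =>
            PySem.List.pyGetD (pvHist (PySem.List.slice linhas (some (j * K)) (some ((j + 1) * K))))
              ((m : Nat) : Int) 0) := by
        apply List.map_congr_left
        intro j hj
        rw [PySem.List.mem_pyRange_one] at hj
        rw [PySem.List.pyGetD_map_pyRange_of_nonneg _ C j [] hj.1 hj.2]
        rw [pvHistIdx_eq linhas (j * K) ((j + 1) * K) (mul_nonneg hj.1 hKpos.le)
          (by nlinarith) (by rw [← hN]; nlinarith [mul_le_mul_of_nonneg_right (by omega : j + 1 ≤ C) hKpos.le])]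
      rw [hcol, PySem.List.pyRange_one_cons hCpos]
      simp only [List.map_cons, List.foldl_cons]
      rw [if_neg (List.cons_ne_nil _ _), if_neg (List.cons_ne_nil _ _),
        PySem.List.max?_id_cons, PySem.List.min?_id_cons]
      simp only [Option.getD_some]
      have hstep0 : pvStep linhas K none 0
          = some (pvHist (PySem.List.slice linhas (some (0 * K)) (some ((0 + 1) * K))),
                  pvHist (PySem.List.slice linhas (some (0 * K)) (some ((0 + 1) * K)))) := rfl
      rw [hstep0, pvStep_foldl]
      simp only [Option.getD_some]
      rw [foldl_zip_getD max (PySem.List.pyRange (0 + 1) C)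
          (fun j => pvHist (PySem.List.slice linhas (some (j * K)) (some ((j + 1) * K))))
          _ m hm (pvHist_length _) (fun j => pvHist_length _),
        foldl_zip_getD min (PySem.List.pyRange (0 + 1) C)
          (fun j => pvHist (PySem.List.slice linhas (some (j * K)) (some ((j + 1) * K))))
          _ m hm (pvHist_length _) (fun j => pvHist_length _),
        List.foldl_map, List.foldl_map]
      by_cases hrpos : r > 0
      · rw [if_pos hrpos, if_pos hrpos, if_pos hrpos,
          pvHistIdx_eq linhas (C * K) N (mul_nonneg (by omega) hKpos.le) hCKN (by rw [← hN])]
      · rw [if_neg hrpos, if_neg hrpos, pyGetD_replicate_zero m hm]
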